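-- pv_equiv track=rewrite | github.com/xinning1611/student-engagement-monitoring-system | main/emotion_mapping.py | map_standard_to_classroom
-- ===== SOURCE A (Python) =====
-- standard_emotions_AU = {
--     'happiness': {6, 12},
--     'sadness': {1, 4, 15},
--     'anger': {4, 5, 7, 23},
--     'surprise': {1, 2, 5, 26},
--     'fear': {1, 2, 4, 5, 7, 20, 26},
--     'disgust': {9, 10, 15, 16, 17},
--     'contempt': {12, 14},
--     'repression': {4, 12, 14, 15, 17},
--     'tense': {4, 5, 6, 7, 12, 14, 17, 24},
--     'neutral': {}
-- }
--
-- classroom_emotions_AU = {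
--     'focus': {2, 4, 14, 23},
--     'distraction': {41, 42, 43, 54, 64},
--     'confusion': {1, 4, 7, 12, 17},
--     'frustration': {1, 2, 4, 12, 14},
--     'boredom': {4, 7, 12, 17, 43}
-- }
--
-- def map_standard_to_classroom(sequence_of_standard_emotions):
--     # Initialize cumulative sum of AUs
--     cumulative_AUs = {}
--
--     # For each standard emotion in the sequence, get the AUs for the standard emotion
--     for standard_emotion in sequence_of_standard_emotions:
--         AUs = standard_emotions_AU.get(standard_emotion, set())
--
--         # Update the cumulative AUs count
--         for action_unit in AUs:
--             cumulative_AUs[action_unit] = cumulative_AUs.get(action_unit, 0) + 1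
--
--     # Find the classroom emotion with the maximum AU overlap
--     matching_classroom_emotion = None
--     max_overlap = -1
--
--     for classroom_emotion, classroom_AUs in classroom_emotions_AU.items():
--         # Calculate the overlap between cumulative AU and classroom emotion's AUs
--         overlap = sum(cumulative_AUs.get(action_unit, 0) for action_unit in classroom_AUs)
--
--         # Update the best matching classroom emotion if current overlap is greater than the previous maximum
--         if overlap > max_overlap:
--             max_overlap = overlap
--             matching_classroom_emotion = classroom_emotion
--
--     return matching_classroom_emotion, max_overlap
-- ===== SOURCE B (Python) =====
-- standard_emotions_AU = {
--     'happiness': {6, 12},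
--     'sadness': {1, 4, 15},
--     'anger': {4, 5, 7, 23},
--     'surprise': {1, 2, 5, 26},
--     'fear': {1, 2, 4, 5, 7, 20, 26},
--     'disgust': {9, 10, 15, 16, 17},
--     'contempt': {12, 14},
--     'repression': {4, 12, 14, 15, 17},
--     'tense': {4, 5, 6, 7, 12, 14, 17, 24},
--     'neutral': {}
-- }
--
-- classroom_emotions_AU = {
--     'focus': {2, 4, 14, 23},
--     'distraction': {41, 42, 43, 54, 64},
--     'confusion': {1, 4, 7, 12, 17},
--     'frustration': {1, 2, 4, 12, 14},
--     'boredom': {4, 7, 12, 17, 43}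
-- }
--
-- def map_standard_to_classroom(sequence_of_standard_emotions):
--     # Single pass over the sequence, accumulating per-classroom scores directly
--     # (no cumulative per-AU frequency dict), then an argmax scan with strict '>'.
--     scores = {c: 0 for c in classroom_emotions_AU}
--     for standard_emotion in sequence_of_standard_emotions:
--         aus = standard_emotions_AU.get(standard_emotion, set())
--         for classroom_emotion, classroom_AUs in classroom_emotions_AU.items():
--             scores[classroom_emotion] += len(classroom_AUs.intersection(aus))
--     best_emotion, best_score = None, -1
--     for classroom_emotion, score in scores.items():
--         if score > best_score:
--             best_emotion, best_score = classroom_emotion, score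
--     return best_emotion, best_score
-- ===== Notes on version B (the rewrite author's own statement) =====
-- stated objective: alternative
-- what changed: Drops the cumulative per-AU frequency dict: B makes a single pass over the sequence accumulating a per-classroom-emotion score dict (adding each frame's AU-intersection size to every classroom's score), then a separate argmax scan over the scores with strict '>'.
import Mathlib
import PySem

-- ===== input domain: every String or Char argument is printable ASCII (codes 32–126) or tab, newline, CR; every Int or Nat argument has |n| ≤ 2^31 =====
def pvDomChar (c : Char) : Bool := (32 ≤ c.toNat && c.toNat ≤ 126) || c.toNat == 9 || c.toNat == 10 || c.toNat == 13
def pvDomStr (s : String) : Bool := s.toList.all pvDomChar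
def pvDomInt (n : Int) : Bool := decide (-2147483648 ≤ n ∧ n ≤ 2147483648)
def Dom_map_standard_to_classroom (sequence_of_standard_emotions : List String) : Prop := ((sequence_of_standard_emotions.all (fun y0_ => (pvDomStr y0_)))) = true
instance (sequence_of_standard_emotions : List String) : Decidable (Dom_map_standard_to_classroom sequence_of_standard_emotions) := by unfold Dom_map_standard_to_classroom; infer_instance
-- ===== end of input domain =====

-- B replaces A's cumulative per-AU frequency dict by a single pass over the sequence
-- accumulating a per-classroom score table, followed by an argmax scan (objective: alternative).

-- shared module constants: the two AU tables (set iteration order does not affect the sums)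
def stdAU (e : String) : List Int :=
  if e = "happiness" then [6, 12]
  else if e = "sadness" then [1, 4, 15]
  else if e = "anger" then [4, 5, 7, 23]
  else if e = "surprise" then [1, 2, 5, 26]
  else if e = "fear" then [1, 2, 4, 5, 7, 20, 26]
  else if e = "disgust" then [9, 10, 15, 16, 17]
  else if e = "contempt" then [12, 14]
  else if e = "repression" then [4, 12, 14, 15, 17]
  else if e = "tense" then [4, 5, 6, 7, 12, 14, 17, 24]
  else []

def classroomAU : List (String × List Int) :=
  [("focus", [2, 4, 14, 23]),
   ("distraction", [41, 42, 43, 54, 64]),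
   ("confusion", [1, 4, 7, 12, 17]),
   ("frustration", [1, 2, 4, 12, 14]),
   ("boredom", [4, 7, 12, 17, 43])]

-- ===== PORT A =====
-- the cumulative_AUs counter dict built by A's first loop
def cumOf (seq : List String) : PySem.Dict Int Int :=
  seq.foldl (fun d e => (stdAU e).foldl (fun d au => d.insert au (d.getD au 0 + 1)) d)
    PySem.Dict.empty

def map_standard_to_classroom (sequence_of_standard_emotions : List String) :
    Option String × Int :=
  classroomAU.foldl
    (fun st p =>
      if st.2 < p.2.foldl (fun s au => s + (cumOf sequence_of_standard_emotions).getD au 0) 0 then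
        (some p.1, p.2.foldl (fun s au => s + (cumOf sequence_of_standard_emotions).getD au 0) 0)
      else st)
    ((none : Option String), (-1 : Int))

-- ===== PORT B =====
-- len(classroom_AUs.intersection(aus))
def interLen (cAUs aus : List Int) : Int :=
  ((cAUs.filter (fun x => aus.contains x)).length : Int)

-- the scores table: each classroom emotion paired (with its AU set) with its running score
def scoresOf (seq : List String) : List ((String × List Int) × Int) :=
  seq.foldl
    (fun scores e => scores.map (fun q => (q.1, q.2 + interLen q.1.2 (stdAU e))))
    (classroomAU.map (fun c => (c, (0 : Int))))

def map_standard_to_classroom_alt (sequence_of_standard_emotions : List String) :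
    Option String × Int :=
  (scoresOf sequence_of_standard_emotions).foldl
    (fun st q => if st.2 < q.2 then (some q.1.1, q.2) else st)
    ((none : Option String), (-1 : Int))

-- ===== PRECONDITION & SPEC =====
def Spec_map_standard_to_classroom (sequence_of_standard_emotions : List String) (out : Option String × Int) : Prop := out = map_standard_to_classroom_alt sequence_of_standard_emotions
instance (sequence_of_standard_emotions : List String) (out : Option String × Int) : Decidable (Spec_map_standard_to_classroom sequence_of_standard_emotions out) := by unfold Spec_map_standard_to_classroom; infer_instance

-- ===== CLAIM (what is proved, stated in full; the proofs are below) =====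
def Claim_equal_map_standard_to_classroom : Prop := ∀ (sequence_of_standard_emotions : List String), Dom_map_standard_to_classroom sequence_of_standard_emotions → Spec_map_standard_to_classroom sequence_of_standard_emotions (map_standard_to_classroom sequence_of_standard_emotions)

-- ===== LEMMAS AND PROOFS =====

lemma stdAU_nodup (e : String) : (stdAU e).Nodup := by
  unfold stdAU; split_ifs <;> decide

lemma foldl_add_map {α : Type} (f : α → Int) (c : List α) :
    ∀ s : Int, c.foldl (fun s x => s + f x) s = s + (c.map f).sum := by
  induction c with
  | nil => intro s; simp
  | cons x xs ih => intro s; simp [List.foldl_cons, ih]; ring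

lemma sum_map_getD_insert (c : List Int) (d : PySem.Dict Int Int) (au : Int) (hc : c.Nodup) :
    (c.map (fun x => (d.insert au (d.getD au 0 + 1)).getD x 0)).sum
      = (c.map (fun x => d.getD x 0)).sum + (if au ∈ c then 1 else 0) := by
  induction c with
  | nil => simp
  | cons x xs ih =>
    obtain ⟨hx, hxs⟩ := List.nodup_cons.mp hc
    by_cases hxa : x = au
    · subst hxa
      have htail : xs.map (fun y => (d.insert x (d.getD x 0 + 1)).getD y 0)
          = xs.map (fun y => d.getD y 0) :=
        List.map_congr_left (fun y hy =>
          PySem.Dict.getD_insert_of_ne d (d.getD x 0 + 1) 0 (fun h => hx (h ▸ hy)))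
      simp [List.map_cons, List.sum_cons, htail, PySem.Dict.getD_insert_self]
      ring
    · have hne : au ≠ x := fun hh => hxa hh.symm
      have hhead : (d.insert au (d.getD au 0 + 1)).getD x 0 = d.getD x 0 :=
        PySem.Dict.getD_insert_of_ne d (d.getD au 0 + 1) 0 hxa
      have hite : (if au ∈ x :: xs then (1 : Int) else 0) = if au ∈ xs then 1 else 0 := by
        by_cases h : au ∈ xs <;> simp [List.mem_cons, h, hne]
      simp only [List.map_cons, List.sum_cons, hhead, ih hxs, hite]
      ring

lemma filter_contains_cons (c : List Int) (au : Int) (aus : List Int)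
    (hc : c.Nodup) (ha : au ∉ aus) :
    ((c.filter (fun x => (au :: aus).contains x)).length : Int)
      = ((c.filter (fun x => aus.contains x)).length : Int) + (if au ∈ c then 1 else 0) := by
  induction c with
  | nil => simp
  | cons x xs ih =>
    obtain ⟨hx, hxs⟩ := List.nodup_cons.mp hc
    have htail := ih hxs
    by_cases hxa : x = au
    · subst hxa
      have hA : List.filter (fun y => (x :: aus).contains y) (x :: xs)
          = x :: List.filter (fun y => (x :: aus).contains y) xs := by
        simp
      have hB : List.filter (fun y => aus.contains y) (x :: xs)
          = List.filter (fun y => aus.contains y) xs := by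
        simp [ha]
      rw [if_neg hx] at htail
      rw [hA, hB, if_pos (List.mem_cons_self), List.length_cons]
      push_cast
      omega
    · have hne : au ≠ x := fun hh => hxa hh.symm
      have hite : (if au ∈ x :: xs then (1 : Int) else 0) = if au ∈ xs then 1 else 0 := by
        by_cases h : au ∈ xs <;> simp [List.mem_cons, h, hne]
      by_cases hxaus : x ∈ aus
      · have hA : List.filter (fun y => (au :: aus).contains y) (x :: xs)
            = x :: List.filter (fun y => (au :: aus).contains y) xs := by
          simp [hxaus]
        have hB : List.filter (fun y => aus.contains y) (x :: xs)
            = x :: List.filter (fun y => aus.contains y) xs := by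
          simp [hxaus]
        rw [hA, hB, hite, List.length_cons, List.length_cons]
        by_cases hau : au ∈ xs <;> simp only [hau, if_true, if_false] at htail ⊢ <;>
          push_cast <;> omega
      · have hA : List.filter (fun y => (au :: aus).contains y) (x :: xs)
            = List.filter (fun y => (au :: aus).contains y) xs := by
          simp [hxa, hxaus]
        have hB : List.filter (fun y => aus.contains y) (x :: xs)
            = List.filter (fun y => aus.contains y) xs := by
          simp [hxaus]
        rw [hA, hB, hite, htail]

lemma sum_map_getD_update (c : List Int) (hc : c.Nodup) :
    ∀ (aus : List Int), aus.Nodup → ∀ d : PySem.Dict Int Int,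
    (c.map (fun x => (aus.foldl (fun d au => d.insert au (d.getD au 0 + 1)) d).getD x 0)).sum
      = (c.map (fun x => d.getD x 0)).sum + interLen c aus := by
  intro aus
  induction aus with
  | nil =>
    intro _ d
    simp [interLen]
  | cons au aus ih =>
    intro hnd d
    obtain ⟨hau, haus⟩ := List.nodup_cons.mp hnd
    rw [List.foldl_cons, ih haus, sum_map_getD_insert c d au hc]
    unfold interLen
    rw [filter_contains_cons c au aus hc hau]
    ring

lemma sum_map_getD_cum (c : List Int) (hc : c.Nodup) :
    ∀ (seq : List String) (d : PySem.Dict Int Int),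
    (c.map (fun x => (seq.foldl
        (fun d e => (stdAU e).foldl (fun d au => d.insert au (d.getD au 0 + 1)) d) d).getD x 0)).sum
      = (c.map (fun x => d.getD x 0)).sum + (seq.map (fun e => interLen c (stdAU e))).sum := by
  intro seq
  induction seq with
  | nil => intro d; simp
  | cons e seq ih =>
    intro d
    rw [List.foldl_cons, ih, sum_map_getD_update c hc (stdAU e) (stdAU_nodup e) d]
    simp [List.map_cons, List.sum_cons]
    ring

-- A's overlap for a classroom emotion equals the sum of per-frame intersection sizes
lemma score_eq (seq : List String) (c : List Int) (hc : c.Nodup) :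
    c.foldl (fun s au => s + (cumOf seq).getD au 0) 0
      = (seq.map (fun e => interLen c (stdAU e))).sum := by
  rw [foldl_add_map (fun au => (cumOf seq).getD au 0) c 0]
  unfold cumOf
  rw [sum_map_getD_cum c hc seq PySem.Dict.empty]
  simp [PySem.Dict.getD_empty]

-- B's score table is the classroom list paired with the per-frame intersection sums
lemma scoresOf_eq (seq : List String) :
    scoresOf seq = classroomAU.map (fun c => (c, (seq.map (fun e => interLen c.2 (stdAU e))).sum)) := by
  unfold scoresOf
  suffices h : ∀ (s : List String) (g : String × List Int → Int),
      s.foldl (fun scores e => scores.map (fun q => (q.1, q.2 + interLen q.1.2 (stdAU e))))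
        (classroomAU.map (fun c => (c, g c)))
      = classroomAU.map (fun c => (c, g c + (s.map (fun e => interLen c.2 (stdAU e))).sum)) by
    simpa using h seq (fun _ => 0)
  intro s
  induction s with
  | nil => intro g; simp
  | cons e s ih =>
    intro g
    rw [List.foldl_cons, List.map_map]
    have hcomp : ((fun q : (String × List Int) × Int => (q.1, q.2 + interLen q.1.2 (stdAU e)))
        ∘ fun c => (c, g c)) = fun c => (c, g c + interLen c.2 (stdAU e)) := rfl
    rw [hcomp, ih (fun c => g c + interLen c.2 (stdAU e))]
    apply List.map_congr_left
    intro c _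
    simp [add_assoc]

-- ===== VERDICT (by name: the statement is the Claim_ definition above) =====
theorem map_standard_to_classroom_spec : Claim_equal_map_standard_to_classroom := by
  intro seq _
  unfold Spec_map_standard_to_classroom map_standard_to_classroom map_standard_to_classroom_alt
  rw [scoresOf_eq, List.foldl_map]
  apply PySem.List.foldl_congr_mem
  intro st p hp
  simp only [classroomAU, List.mem_cons, List.not_mem_nil, or_false] at hp
  rcases hp with rfl | rfl | rfl | rfl | rfl <;>
    rw [score_eq seq _ (by decide)]
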